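-- pv_equiv track=rewrite | github.com/finchf/homework | practic_4/20.py | your_size
-- ===== SOURCE A (Python) =====
-- def your_size(s):
--     XXS = {'Россия': 42,
--            'Германия': 36,
--            'США': 8,
--            'Франция': 38,
--            'Великобритания': 24}
--
--     if s.lower() == "xxs":
--         return '\n'.join(f'{key} - {str(value)}' for key, value in XXS.items())
--
--     elif s.lower() == "xs":
--         answer = {key: value + 2 for key, value in XXS.items()}
--         return '\n'.join(f'{key} - {str(value)}' for key, value in answer.items())
--
--     elif s.lower() == "s":
--         answer = {key: value + 4 for key, value in XXS.items()}
--         return '\n'.join(f'{key} - {str(value)}' for key, value in answer.items())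
--
--     elif s.lower() == "m":
--         answer = {key: value + 6 for key, value in XXS.items()}
--         return '\n'.join(f'{key} - {str(value)}' for key, value in answer.items())
--
--     elif s.lower() == "l":
--         answer = {key: value + 8 for key, value in XXS.items()}
--         return '\n'.join(f'{key} - {str(value)}' for key, value in answer.items())
--
--     elif s.lower() == "xl":
--         answer = {key: value + 10 for key, value in XXS.items()}
--         return '\n'.join(f'{key} - {str(value)}' for key, value in answer.items())
--
--     elif s.lower() == "xxl":
--         answer = {key: value + 12 for key, value in XXS.items()}
--         return '\n'.join(f'{key} - {str(value)}' for key, value in answer.items())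
--
--     elif s.lower() == "xxxl":
--         answer = {key: value + 14 for key, value in XXS.items()}
--         return '\n'.join(f'{key} - {str(value)}' for key, value in answer.items())
--     else:
--         return "Error insert data!!!"
-- ===== SOURCE B (Python) =====
-- def your_size(s):
--     key = s.lower()
--     # parse the size name: a run of leading 'x's followed by a base letter s/m/l;
--     # offsets are arithmetic in the run length: x^k s -> 4-2k (k<=2), m -> 6, x^k l -> 8+2k (k<=3)
--     k = 0
--     while k < len(key) and key[k] == 'x':
--         k += 1
--     rest = key[k:]
--     if rest == 's' and k <= 2:
--         off = 4 - 2 * k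
--     elif rest == 'm' and k == 0:
--         off = 6
--     elif rest == 'l' and k <= 3:
--         off = 8 + 2 * k
--     else:
--         return "Error insert data!!!"
--     lines = []
--     for country, v in [('Россия', 42), ('Германия', 36), ('США', 8),
--                        ('Франция', 38), ('Великобритания', 24)]:
--         lines.append(f'{country} - {v + off}')
--     return '\n'.join(lines)
-- ===== Notes on version B (the rewrite author's own statement) =====
-- stated objective: simpler
-- what changed: Replaced A's eight whole-string comparisons (one dict comprehension + join per branch) by parsing the size name itself: count the leading 'x's with one loop, read the base letter s/m/l, and compute the offset arithmetically from the run length (x^k s -> 4-2k, m -> 6, x^k l -> 8+2k), then one uniform rendering pass.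
import Mathlib
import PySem

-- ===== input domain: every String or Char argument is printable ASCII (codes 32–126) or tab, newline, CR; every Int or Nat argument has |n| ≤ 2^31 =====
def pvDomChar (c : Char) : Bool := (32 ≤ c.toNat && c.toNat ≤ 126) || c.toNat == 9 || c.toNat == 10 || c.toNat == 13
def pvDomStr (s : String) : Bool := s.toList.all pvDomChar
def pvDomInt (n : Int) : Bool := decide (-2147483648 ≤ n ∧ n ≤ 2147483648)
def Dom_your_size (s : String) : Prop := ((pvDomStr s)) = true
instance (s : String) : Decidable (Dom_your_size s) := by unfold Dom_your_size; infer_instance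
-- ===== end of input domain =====

-- B derives the offset arithmetically from the size name's structure (count of leading 'x's plus base letter s/m/l) instead of A's eight-way if/elif cascade of whole-string comparisons (simpler).


-- ===== PORT A =====
-- the dict literal XXS (insertion order)
def pvXXS_A : List (String × Int) :=
  [("Россия", 42), ("Германия", 36), ("США", 8), ("Франция", 38), ("Великобритания", 24)]
-- '\n'.join(f'{key} - {str(value)}' for key, value in d.items())
def pvJoin_A (d : List (String × Int)) : String :=
  PySem.Str.join "\n" (d.map (fun kv => kv.1 ++ " - " ++ PySem.Int.toStr kv.2))

def your_size (s : String) : String :=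
  if PySem.Str.lower s = "xxs" then pvJoin_A pvXXS_A
  else if PySem.Str.lower s = "xs" then pvJoin_A (pvXXS_A.map (fun kv => (kv.1, kv.2 + 2)))
  else if PySem.Str.lower s = "s" then pvJoin_A (pvXXS_A.map (fun kv => (kv.1, kv.2 + 4)))
  else if PySem.Str.lower s = "m" then pvJoin_A (pvXXS_A.map (fun kv => (kv.1, kv.2 + 6)))
  else if PySem.Str.lower s = "l" then pvJoin_A (pvXXS_A.map (fun kv => (kv.1, kv.2 + 8)))
  else if PySem.Str.lower s = "xl" then pvJoin_A (pvXXS_A.map (fun kv => (kv.1, kv.2 + 10)))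
  else if PySem.Str.lower s = "xxl" then pvJoin_A (pvXXS_A.map (fun kv => (kv.1, kv.2 + 12)))
  else if PySem.Str.lower s = "xxxl" then pvJoin_A (pvXXS_A.map (fun kv => (kv.1, kv.2 + 14)))
  else "Error insert data!!!"

-- ===== PORT B =====
-- the while loop 'k = 0; while k < len(key) and key[k] == 'x': k += 1' (count of leading 'x's)
def pvCountX_B : List Char → Nat
  | [] => 0
  | c :: cs => if c = 'x' then pvCountX_B cs + 1 else 0

def pvCountries_B : List (String × Int) :=
  [("Россия", 42), ("Германия", 36), ("США", 8), ("Франция", 38), ("Великобритания", 24)]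

-- the rendering loop: lines = []; for country, v in …: lines.append(f'{country} - {v + off}'); '\n'.join(lines)
def pvRender_B (off : Int) : String :=
  PySem.Str.join "\n"
    (pvCountries_B.foldl (fun lines kv => lines ++ [kv.1 ++ " - " ++ PySem.Int.toStr (kv.2 + off)]) [])

def your_size_alt (s : String) : String :=
  let key := (PySem.Str.lower s).toList
  let k := pvCountX_B key
  let rest := key.drop k        -- key[k:] : exact, since 0 ≤ k ≤ len(key)
  if rest = ['s'] ∧ k ≤ 2 then pvRender_B (4 - 2 * (k : Int))
  else if rest = ['m'] ∧ k = 0 then pvRender_B 6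
  else if rest = ['l'] ∧ k ≤ 3 then pvRender_B (8 + 2 * (k : Int))
  else "Error insert data!!!"

-- ===== PRECONDITION & SPEC =====
def Spec_your_size (s : String) (out : String) : Prop := out = your_size_alt s
instance (s : String) (out : String) : Decidable (Spec_your_size s out) := by unfold Spec_your_size; infer_instance

-- ===== CLAIM (what is proved, stated in full; the proofs are below) =====
def Claim_equal_your_size : Prop := ∀ (s : String), Dom_your_size s → Spec_your_size s (your_size s)

-- ===== LEMMAS AND PROOFS =====
-- the leading-x run: l.take (pvCountX_B l) is a block of 'x's
theorem take_countX (l : List Char) : l.take (pvCountX_B l) = List.replicate (pvCountX_B l) 'x' := by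
  induction l with
  | nil => simp [pvCountX_B]
  | cons c cs ih =>
    by_cases h : c = 'x'
    · simp [pvCountX_B, h, List.replicate_succ, ih]
    · simp [pvCountX_B, h]

theorem decompose_countX (l : List Char) :
    l = List.replicate (pvCountX_B l) 'x' ++ l.drop (pvCountX_B l) := by
  conv_lhs => rw [← List.take_append_drop (pvCountX_B l) l]
  rw [take_countX]

theorem your_size_eq_alt (s : String) : your_size s = your_size_alt s := by
  by_cases h1 : PySem.Str.lower s = "xxs"
  · simp only [your_size, your_size_alt, h1]; decide
  by_cases h2 : PySem.Str.lower s = "xs"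
  · simp only [your_size, your_size_alt, h2]; decide
  by_cases h3 : PySem.Str.lower s = "s"
  · simp only [your_size, your_size_alt, h3]; decide
  by_cases h4 : PySem.Str.lower s = "m"
  · simp only [your_size, your_size_alt, h4]; decide
  by_cases h5 : PySem.Str.lower s = "l"
  · simp only [your_size, your_size_alt, h5]; decide
  by_cases h6 : PySem.Str.lower s = "xl"
  · simp only [your_size, your_size_alt, h6]; decide
  by_cases h7 : PySem.Str.lower s = "xxl"
  · simp only [your_size, your_size_alt, h7]; decide
  by_cases h8 : PySem.Str.lower s = "xxxl"
  · simp only [your_size, your_size_alt, h8]; decide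
  -- key is none of the eight sizes: both sides return the error string
  · have hA : your_size s = "Error insert data!!!" := by
      simp [your_size, h1, h2, h3, h4, h5, h6, h7, h8]
    rw [hA]
    set l := (PySem.Str.lower s).toList with hl
    set k := pvCountX_B l with hk
    have hdec : l = List.replicate k 'x' ++ l.drop k := by rw [hk]; exact decompose_countX l
    have hkey : ∀ cs : List Char, l = cs → PySem.Str.lower s = String.ofList cs := by
      intro cs h
      apply String.toList_injective
      rw [← hl]; simp [h]
    simp only [your_size_alt]
    rw [← hl, ← hk]
    split_ifs with c1 c2 c3
    · -- rest = ['s'], k ≤ 2 : key is "s"/"xs"/"xxs", contradiction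
      obtain ⟨hr, hk2⟩ := c1
      rw [hr] at hdec
      interval_cases k
      · exact absurd (hkey _ hdec) (by simpa using h3)
      · exact absurd (hkey _ hdec) (by simpa using h2)
      · exact absurd (hkey _ hdec) (by simpa using h1)
    · -- rest = ['m'], k = 0 : key is "m"
      obtain ⟨hr, hk0⟩ := c2
      rw [hr, hk0] at hdec
      exact absurd (hkey _ hdec) (by simpa using h4)
    · -- rest = ['l'], k ≤ 3 : key is "l"/"xl"/"xxl"/"xxxl"
      obtain ⟨hr, hk3⟩ := c3
      rw [hr] at hdec
      interval_cases k
      · exact absurd (hkey _ hdec) (by simpa using h5)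
      · exact absurd (hkey _ hdec) (by simpa using h6)
      · exact absurd (hkey _ hdec) (by simpa using h7)
      · exact absurd (hkey _ hdec) (by simpa using h8)
    · rfl

-- ===== VERDICT (by name: the statement is the Claim_ definition above) =====
theorem your_size_spec : Claim_equal_your_size := by
  intro s _
  exact your_size_eq_alt s
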